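-- pv_equiv track=rewrite | github.com/FantomCek123/triggle-ai-p1 | TrinityForce/board.py | links_for_move
-- ===== SOURCE A (Python) =====
-- def links_for_move(letter, number, direction, size):
-- 	if direction == "D":
-- 		lista = [(letter, number + i) for i in range(0, 4)]
-- 		return [(lista[i], lista[i + 1]) for i in range(3)]
--
-- 	elif direction == "DD":
-- 		half_char = ord('A') + size
-- 		lista = []
-- 		broj = 1
--
-- 		while ord(letter) + 1 < half_char:
-- 			lista.append(((letter, number), (chr(ord(letter) + 1), number + 1)))
-- 			broj += 1
-- 			number += 1
-- 			letter = chr(ord(letter) + 1)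
-- 			if broj == 4:
-- 				return lista
--
-- 		for i in range(4 - broj):
-- 			lista.append(((letter, number), (chr(ord(letter) + 1), number)))
-- 			letter = chr(ord(letter) + 1)
--
-- 		return lista
--
--
-- 	elif direction == "DL":
-- 		half_char = ord('A') + size
-- 		lista = []
-- 		broj = 0
--
-- 		while ord(letter) + 1 < half_char:
-- 			lista.append(((letter, number), (chr(ord(letter) + 1), number)))
-- 			broj += 1
-- 			letter = chr(ord(letter) + 1)
-- 			if broj == 3:
-- 				return lista
--
-- 		for i in range(3 - broj):
-- 			lista.append(((letter, number - i), (chr(ord(letter) + 1), number - i - 1)))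
-- 			letter = chr(ord(letter) + 1)
--
-- 		return lista
-- ===== SOURCE B (Python) =====
-- def links_for_move(letter, number, direction, size):
--     # A move is a path of 4 pegs obtained by iterating a direction-dependent
--     # successor function; the links are adjacent pairs of that path.
--     if direction not in ("D", "DD", "DL"):
--         return None
--     half = ord('A') + size
--
--     def step(node):
--         L, n = node
--         if direction == "D":
--             return (L, n + 1)
--         nxt = chr(ord(L) + 1)
--         if direction == "DD":
--             return (nxt, n + 1) if ord(L) + 1 < half else (nxt, n)
--         return (nxt, n) if ord(L) + 1 < half else (nxt, n - 1)
--
--     path = [(letter, number)]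
--     for _ in range(3):
--         path.append(step(path[-1]))
--     return list(zip(path, path[1:]))
-- ===== Notes on version B (the rewrite author's own statement) =====
-- stated objective: alternative
-- what changed: A's three per-direction loops (a stateful while with an early return plus a mop-up for-loop mutating letter/number/broj) are replaced by one uniform algorithm: build the 4-peg path by iterating a direction-dependent successor function, then emit the links as adjacent pairs of the path (zip(path, path[1:])).
import Mathlib
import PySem

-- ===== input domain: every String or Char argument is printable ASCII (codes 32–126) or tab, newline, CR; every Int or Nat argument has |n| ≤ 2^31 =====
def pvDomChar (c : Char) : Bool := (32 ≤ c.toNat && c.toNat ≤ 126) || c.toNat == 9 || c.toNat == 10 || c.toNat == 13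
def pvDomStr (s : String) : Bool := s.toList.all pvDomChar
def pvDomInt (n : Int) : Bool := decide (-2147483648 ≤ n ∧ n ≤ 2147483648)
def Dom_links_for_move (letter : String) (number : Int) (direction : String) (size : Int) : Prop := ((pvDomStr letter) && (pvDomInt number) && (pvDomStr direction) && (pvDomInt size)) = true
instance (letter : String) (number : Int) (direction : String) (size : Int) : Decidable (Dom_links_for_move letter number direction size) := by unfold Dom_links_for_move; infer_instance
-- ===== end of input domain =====

-- B replaces A's three per-direction loops (stateful while with early return, then a
-- mop-up for loop) by a single uniform algorithm: iterate a direction-dependent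
-- successor function to build the 4-peg path, then link adjacent path nodes
-- (objective: alternative decomposition).

-- ===== PORT A =====
-- chr(o) for an ASCII code point o (exact for 0 ≤ o < 0xD800; here 32 ≤ o ≤ 130)
def pvChr (o : Int) : String := String.ofList [Char.ofNat o.toNat]
-- the DD while-loop: state (letter-code o, number n, broj, lista); fuel 3 suffices since the
-- loop body runs at most 3 times before the broj check returns (.inl = early return)
def pvDDLoop : Nat → Int → Int → Int → Int → List ((String × Int) × (String × Int)) →
    Sum (List ((String × Int) × (String × Int))) (Int × Int × Int × List ((String × Int) × (String × Int)))
  | 0, _, o, n, broj, lista => .inr (o, n, broj, lista)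
  | f + 1, half, o, n, broj, lista =>
      if o + 1 < half then
        let lista' := lista ++ [((pvChr o, n), (pvChr (o + 1), n + 1))]
        if broj + 1 = 4 then .inl lista'
        else pvDDLoop f half (o + 1) (n + 1) (broj + 1) lista'
      else .inr (o, n, broj, lista)

-- the DL while-loop, broj starts at 0 and the early return fires at broj == 3
def pvDLLoop : Nat → Int → Int → Int → Int → List ((String × Int) × (String × Int)) →
    Sum (List ((String × Int) × (String × Int))) (Int × Int × Int × List ((String × Int) × (String × Int)))
  | 0, _, o, n, broj, lista => .inr (o, n, broj, lista)
  | f + 1, half, o, n, broj, lista =>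
      if o + 1 < half then
        let lista' := lista ++ [((pvChr o, n), (pvChr (o + 1), n))]
        if broj + 1 = 3 then .inl lista'
        else pvDLLoop f half (o + 1) n (broj + 1) lista'
      else .inr (o, n, broj, lista)

def links_for_move (letter : String) (number : Int) (direction : String) (size : Int) : Option (List ((String × Int) × (String × Int))) :=
  if direction = "D" then
    let lista := (PySem.List.pyRange 0 4 1).map (fun i => (letter, number + i))
    some ((PySem.List.pyRange 0 3 1).map (fun i =>
      (PySem.List.pyGetD lista i ("", 0), PySem.List.pyGetD lista (i + 1) ("", 0))))
  else if direction = "DD" then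
    match letter.toList with
    | [c] =>  -- ord(letter) raises unless letter is one character; Pre_ excludes the rest
      some (match pvDDLoop 3 (65 + size) (c.toNat : Int) number 1 [] with
      | .inl l => l
      | .inr (o, n, broj, lista) =>
          -- for i in range(4 - broj): append ((letter, number), (letter+1, number)); letter += 1
          ((PySem.List.pyRange 0 (4 - broj) 1).foldl
            (fun st _ => (st.1 + 1, st.2 ++ [((pvChr st.1, n), (pvChr (st.1 + 1), n))]))
            (o, lista)).2)
    | _ => none
  else if direction = "DL" then
    match letter.toList with
    | [c] =>
      some (match pvDLLoop 3 (65 + size) (c.toNat : Int) number 0 [] with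
      | .inl l => l
      | .inr (o, n, broj, lista) =>
          -- for i in range(3 - broj): append ((letter, number - i), (letter+1, number - i - 1)); letter += 1
          ((PySem.List.pyRange 0 (3 - broj) 1).foldl
            (fun st i => (st.1 + 1, st.2 ++ [((pvChr st.1, n - i), (pvChr (st.1 + 1), n - i - 1))]))
            (o, lista)).2)
    | _ => none
  else none

-- ===== PORT B =====
-- ord(s) for a one-character string (Python raises otherwise; Pre_ excludes those inputs)
def pvOrdB (s : String) : Int := ((s.toList.headD 'A').toNat : Int)
-- chr(o), kept separate so the two ports share no definitions
def pvChrB (o : Int) : String := String.singleton (Char.ofNat o.toNat)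
-- Source B's local `step`: the direction-dependent successor of a peg
def pvStepB (direction : String) (half : Int) (node : String × Int) : String × Int :=
  if direction = "D" then (node.1, node.2 + 1)
  else
    let o := pvOrdB node.1
    let nxt := pvChrB (o + 1)
    if direction = "DD" then
      if o + 1 < half then (nxt, node.2 + 1) else (nxt, node.2)
    else
      if o + 1 < half then (nxt, node.2) else (nxt, node.2 - 1)

def links_for_move_alt (letter : String) (number : Int) (direction : String) (size : Int) : Option (List ((String × Int) × (String × Int))) :=
  if direction = "D" ∨ direction = "DD" ∨ direction = "DL" then
    let half : Int := 65 + size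
    -- path = [(letter, number)]; 3× append step(path[-1]) (path is never empty, so
    -- path[-1] is its last element: getLastD is exact here)
    let path := (List.range 3).foldl
      (fun p _ => p ++ [pvStepB direction half (p.getLastD (letter, number))])
      [(letter, number)]
    -- list(zip(path, path[1:]))
    some (path.zip path.tail)
  else none

-- ===== PRECONDITION & SPEC =====
-- Pre_ excludes only inputs where A raises: for direction "DD"/"DL", ord(letter) raises a
-- TypeError unless letter is exactly one character (B raises there too).
def Pre_links_for_move (letter : String) (number : Int) (direction : String) (size : Int) : Prop :=
  (direction = "DD" ∨ direction = "DL") → letter.toList.length = 1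
instance (letter : String) (number : Int) (direction : String) (size : Int) : Decidable (Pre_links_for_move letter number direction size) := by unfold Pre_links_for_move; infer_instance

def pvWitness_links_for_move : String × Int × String × Int := ("B", 2, "DD", 4)

def Spec_links_for_move (letter : String) (number : Int) (direction : String) (size : Int) (out : Option (List ((String × Int) × (String × Int)))) : Prop := out = links_for_move_alt letter number direction size
instance (letter : String) (number : Int) (direction : String) (size : Int) (out : Option (List ((String × Int) × (String × Int)))) : Decidable (Spec_links_for_move letter number direction size out) := by unfold Spec_links_for_move; infer_instance

-- ===== CLAIM (what is proved, stated in full; the proofs are below) =====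
def Claim_equal_links_for_move : Prop := ∀ (letter : String) (number : Int) (direction : String) (size : Int), Dom_links_for_move letter number direction size → Pre_links_for_move letter number direction size → Spec_links_for_move letter number direction size (links_for_move letter number direction size)

-- ===== LEMMAS AND PROOFS =====

theorem chr_toNat (n : Nat) (h : n < 55296) : (Char.ofNat n).toNat = n := by
  unfold Char.ofNat
  rw [dif_pos (by unfold Nat.isValidChar; omega)]
  simp [Char.toNat, Char.ofNatAux]

theorem ord_chr (m : Int) (h0 : 0 ≤ m) (h1 : m ≤ 1000) : pvOrdB (pvChrB m) = m := by
  simp only [pvOrdB, pvChrB, String.toList_singleton, List.headD_cons]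
  rw [chr_toNat m.toNat (by omega)]
  omega

theorem ord_single (letter : String) (c : Char) (hc : letter.toList = [c]) :
    pvOrdB letter = (c.toNat : Int) := by simp [pvOrdB, hc]

theorem letter_eq (letter : String) (c : Char) (hc : letter.toList = [c]) :
    pvChrB (c.toNat : Int) = letter := by
  have := String.ofList_toList (s := letter)
  simp only [pvChrB, Int.toNat_natCast, Char.ofNat_toNat]
  rw [show String.singleton c = String.ofList [c] from rfl, ← hc, this]

theorem chr_eq (m : Int) : pvChr m = pvChrB m := rfl  -- both are the 1-char string chr(m)

-- DD: A's while-loop with mop-up equals B's path-and-zip, for a letter of code ≤ 126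
theorem dd_branch_eq (letter : String) (c : Char) (hc : letter.toList = [c])
    (hv : c.toNat ≤ 126) (n size : Int) :
    (match pvDDLoop 3 (65 + size) (c.toNat : Int) n 1 [] with
      | .inl l => l
      | .inr (o, m, broj, lista) =>
          ((PySem.List.pyRange 0 (4 - broj) 1).foldl
            (fun st _ => (st.1 + 1, st.2 ++ [((pvChr st.1, m), (pvChr (st.1 + 1), m))]))
            (o, lista)).2)
    = (let path := (List.range 3).foldl
        (fun p _ => p ++ [pvStepB "DD" (65 + size) (p.getLastD (letter, n))])
        [(letter, n)]
       path.zip path.tail) := by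
  have ho := ord_single letter c hc
  have hl' : pvChrB ((c.toNat : Int)) = letter := letter_eq letter c hc
  have e1 : pvOrdB (pvChrB ((c.toNat : Int) + 1)) = (c.toNat : Int) + 1 :=
    ord_chr _ (by omega) (by omega)
  have e2 : pvOrdB (pvChrB ((c.toNat : Int) + 1 + 1)) = (c.toNat : Int) + 1 + 1 :=
    ord_chr _ (by omega) (by omega)
  by_cases h1 : (c.toNat : Int) + 1 < 65 + size
  · by_cases h2 : (c.toNat : Int) + 1 + 1 < 65 + size
    · by_cases h3 : (c.toNat : Int) + 1 + 1 + 1 < 65 + size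
      · simp [pvDDLoop, pvStepB, ho, e1, e2, h1, h2, h3, List.zip, List.zipWith, chr_eq,
          List.range_succ, hl']
      · have h3f : ¬ ((c.toNat : Int) + 1 + 1 + 1 < 65 + size) := h3
        simp [pvDDLoop, pvStepB, ho, e1, e2, h1, h2, h3f, List.zip, List.zipWith, chr_eq,
          List.range_succ, hl', PySem.List.pyRange]
    · have h3f : ¬ ((c.toNat : Int) + 1 + 1 + 1 < 65 + size) := by omega
      simp [pvDDLoop, pvStepB, ho, e1, e2, h1, h2, h3f, List.zip, List.zipWith, chr_eq,
        List.range_succ, hl', PySem.List.pyRange]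
  · have h2f : ¬ ((c.toNat : Int) + 1 + 1 < 65 + size) := by omega
    have h3f : ¬ ((c.toNat : Int) + 1 + 1 + 1 < 65 + size) := by omega
    simp [pvDDLoop, pvStepB, ho, e1, e2, h1, h2f, h3f, List.zip, List.zipWith, chr_eq,
      List.range_succ, hl', PySem.List.pyRange]

-- DL: the same for the DL branch
theorem dl_branch_eq (letter : String) (c : Char) (hc : letter.toList = [c])
    (hv : c.toNat ≤ 126) (n size : Int) :
    (match pvDLLoop 3 (65 + size) (c.toNat : Int) n 0 [] with
      | .inl l => l
      | .inr (o, m, broj, lista) =>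
          ((PySem.List.pyRange 0 (3 - broj) 1).foldl
            (fun st i => (st.1 + 1, st.2 ++ [((pvChr st.1, m - i), (pvChr (st.1 + 1), m - i - 1))]))
            (o, lista)).2)
    = (let path := (List.range 3).foldl
        (fun p _ => p ++ [pvStepB "DL" (65 + size) (p.getLastD (letter, n))])
        [(letter, n)]
       path.zip path.tail) := by
  have ho := ord_single letter c hc
  have hl' : pvChrB ((c.toNat : Int)) = letter := letter_eq letter c hc
  have e1 : pvOrdB (pvChrB ((c.toNat : Int) + 1)) = (c.toNat : Int) + 1 :=
    ord_chr _ (by omega) (by omega)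
  have e2 : pvOrdB (pvChrB ((c.toNat : Int) + 1 + 1)) = (c.toNat : Int) + 1 + 1 :=
    ord_chr _ (by omega) (by omega)
  by_cases h1 : (c.toNat : Int) + 1 < 65 + size
  · by_cases h2 : (c.toNat : Int) + 1 + 1 < 65 + size
    · by_cases h3 : (c.toNat : Int) + 1 + 1 + 1 < 65 + size
      · simp [pvDLLoop, pvStepB, ho, e1, e2, h1, h2, h3, List.zip, List.zipWith, chr_eq,
          List.range_succ, hl']
      · have h3f : ¬ ((c.toNat : Int) + 1 + 1 + 1 < 65 + size) := h3
        simp [pvDLLoop, pvStepB, ho, e1, e2, h1, h2, h3f, List.zip, List.zipWith, chr_eq,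
          List.range_succ, hl', PySem.List.pyRange]
    · have h3f : ¬ ((c.toNat : Int) + 1 + 1 + 1 < 65 + size) := by omega
      simp [pvDLLoop, pvStepB, ho, e1, e2, h1, h2, h3f, List.zip, List.zipWith, chr_eq,
        List.range_succ, hl', PySem.List.pyRange]
  · have h2f : ¬ ((c.toNat : Int) + 1 + 1 < 65 + size) := by omega
    have h3f : ¬ ((c.toNat : Int) + 1 + 1 + 1 < 65 + size) := by omega
    simp [pvDLLoop, pvStepB, ho, e1, e2, h1, h2f, h3f, List.zip, List.zipWith, chr_eq,
      List.range_succ, hl', PySem.List.pyRange]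
    omega

-- ===== VERDICT (by name: the statement is the Claim_ definition above) =====
theorem links_for_move_spec : Claim_equal_links_for_move := by
  intro letter number direction size hdom hpre
  unfold Spec_links_for_move
  have hdomc : ∀ c, letter.toList = [c] → c.toNat ≤ 126 := by
    intro c hc
    unfold Dom_links_for_move pvDomStr at hdom
    simp only [Bool.and_eq_true, List.all_eq_true, hc] at hdom
    have := hdom.1.1.1 c (by simp)
    simp only [pvDomChar, Bool.or_eq_true, Bool.and_eq_true, decide_eq_true_eq,
      beq_iff_eq] at this
    omega
  by_cases hD : direction = "D"
  · subst hD
    simp only [links_for_move, links_for_move_alt, String.reduceEq, reduceIte, true_or, if_true]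
    simp only [pvStepB, String.reduceEq, reduceIte,
      show List.range 3 = [0, 1, 2] from rfl, List.foldl, List.getLastD]
    simp [show PySem.List.pyRange 0 4 1 = [0,1,2,3] from rfl,
      show PySem.List.pyRange 0 3 1 = [0,1,2] from rfl,
      PySem.List.pyGetD, List.zip, List.zipWith]
    omega
  · by_cases hDD : direction = "DD"
    · obtain ⟨c, hc⟩ : ∃ c, letter.toList = [c] := by
        have := hpre (Or.inl hDD)
        cases h : letter.toList with
        | nil => simp [h] at this
        | cons a t => cases t with
          | nil => exact ⟨a, rfl⟩
          | cons b t' => simp [h] at this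
      subst hDD
      simp only [links_for_move, links_for_move_alt, hc, String.reduceEq, reduceIte,
        or_true, true_or, if_true]
      exact congrArg some (dd_branch_eq letter c hc (hdomc c hc) number size)
    · by_cases hDL : direction = "DL"
      · obtain ⟨c, hc⟩ : ∃ c, letter.toList = [c] := by
          have := hpre (Or.inr hDL)
          cases h : letter.toList with
          | nil => simp [h] at this
          | cons a t => cases t with
            | nil => exact ⟨a, rfl⟩
            | cons b t' => simp [h] at this
        subst hDL
        simp only [links_for_move, links_for_move_alt, hc, String.reduceEq, reduceIte,
          or_true, if_true]
        exact congrArg some (dl_branch_eq letter c hc (hdomc c hc) number size)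
      · simp [links_for_move, links_for_move_alt, hD, hDD, hDL]
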